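-- pv_equiv track=rewrite | github.com/jiji-svg/coding_test | level2/remove_every_same_two.py | solution
-- ===== SOURCE A (Python) =====
-- def solution(s):
--
--     s = list(s)
--     tmp_s = []
--     idxs = set()
--     prev_alp = 0
--     for i,alp in enumerate(s):
--         tmp_s.append(alp)
--         if len(tmp_s) == 1:
--             pass
--         else:
--             if tmp_s[-1] == tmp_s[-2]:
--                 tmp_s.pop()
--                 tmp_s.pop()
--     if tmp_s:
--         return 0
--     else:
--         return 1
-- ===== SOURCE B (Python) =====
-- def solution(s):
--     prev = None
--     while s != prev:
--         prev = s
--         out = []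
--         i = 0
--         while i < len(s):
--             if i + 1 < len(s) and s[i] == s[i + 1]:
--                 i += 2
--             else:
--                 out.append(s[i])
--                 i += 1
--         s = "".join(out)
--     return 1 if s == "" else 0
-- ===== Notes on version B (the rewrite author's own statement) =====
-- stated objective: alternative
-- what changed: Replaces A's single stack-based scan with a fixpoint loop that repeatedly removes all non-overlapping adjacent equal pairs in left-to-right rebuild passes until the string stops changing; equality of the emptiness verdict follows from confluence of adjacent-pair reduction.
import Mathlib
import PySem

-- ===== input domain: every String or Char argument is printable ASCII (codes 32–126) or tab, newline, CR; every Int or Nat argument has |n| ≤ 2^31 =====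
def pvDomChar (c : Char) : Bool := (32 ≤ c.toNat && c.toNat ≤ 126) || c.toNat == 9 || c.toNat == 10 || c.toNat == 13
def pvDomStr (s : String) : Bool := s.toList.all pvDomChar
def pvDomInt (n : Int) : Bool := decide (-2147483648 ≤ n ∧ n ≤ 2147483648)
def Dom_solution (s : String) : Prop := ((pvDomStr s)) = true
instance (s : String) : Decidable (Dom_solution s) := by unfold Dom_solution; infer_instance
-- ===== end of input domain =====

-- B replaces A's single stack scan by repeated whole-string passes that remove
-- non-overlapping adjacent equal pairs until a fixpoint; same return value (alternative decomposition).

-- ===== PORT A =====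
-- loop body: tmp_s.append(alp); if len(tmp_s)==1: pass else: if tmp_s[-1]==tmp_s[-2]: pop; pop
def pvStepA (t : List Char) (alp : Char) : List Char :=
  let t' := t ++ [alp]
  if t'.length = 1 then t'
  else if PySem.List.pyGet? t' (-1) = PySem.List.pyGet? t' (-2) then t'.dropLast.dropLast else t'

def solution (s : String) : Int :=
  -- idxs = set(), prev_alp = 0 and the enumerate index i are unused in A
  let tmp := (PySem.List.enumerate s.toList).foldl (fun t p => pvStepA t p.2) []
  if tmp ≠ [] then 0 else 1

-- ===== PORT B =====
-- inner while: one left-to-right rebuild pass removing non-overlapping adjacent equal pairs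
def removePass : List Char → List Char
  | a :: b :: r => if a = b then removePass r else a :: removePass (b :: r)
  | l => l

-- needed by fixPass's termination (fallback branch of the match)
theorem removePass_short (l : List Char) (hl : ∀ (a b : Char) (r : List Char), l = a :: b :: r → False) :
    removePass l = l := by
  rcases l with _ | ⟨a, _ | ⟨b, r⟩⟩
  · rfl
  · rfl
  · exact (hl a b r rfl).elim

-- needed by fixPass's termination
theorem removePass_length_le : ∀ l : List Char, (removePass l).length ≤ l.length := by
  intro l
  induction l using removePass.induct with
  | case1 b r ih =>
      rw [show removePass (b :: b :: r) = removePass r from by simp [removePass]]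
      calc (removePass r).length ≤ r.length := ih
        _ ≤ (b :: b :: r).length := by simp only [List.length_cons]; omega
  | case2 a b r hne ih =>
      simp only [removePass, if_neg hne, List.length_cons]
      simpa using ih
  | case3 l h => rw [removePass_short l h]

-- needed by fixPass's termination
theorem removePass_length_lt (l : List Char) (h : removePass l ≠ l) :
    (removePass l).length < l.length := by
  induction l using removePass.induct with
  | case1 b r ih =>
      rw [show removePass (b :: b :: r) = removePass r from by simp [removePass]]
      have := removePass_length_le r
      simp only [List.length_cons]; omega
  | case2 a b r hne ih =>
      simp only [removePass, if_neg hne] at h ⊢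
      have h' : removePass (b :: r) ≠ b :: r := by
        intro he; exact h (by rw [he])
      have := ih h'
      simp only [List.length_cons] at *; omega
  | case3 l hl => exact absurd (removePass_short l hl) h

-- outer while s != prev: prev = s; s = removePass s
def fixPass (s : List Char) : List Char :=
  if h : removePass s = s then s else fixPass (removePass s)
termination_by s.length
decreasing_by exact removePass_length_lt s h

def solution_alt (s : String) : Int :=
  if fixPass s.toList = [] then 1 else 0

-- ===== PRECONDITION & SPEC =====
def Spec_solution (s : String) (out : Int) : Prop := out = solution_alt s
instance (s : String) (out : Int) : Decidable (Spec_solution s out) := by unfold Spec_solution; infer_instance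

-- ===== CLAIM (what is proved, stated in full; the proofs are below) =====
def Claim_equal_solution : Prop := ∀ (s : String), Dom_solution s → Spec_solution s (solution s)

-- ===== LEMMAS AND PROOFS =====

-- reversed-stack step, used only in the proofs
def stepB (r : List Char) (c : Char) : List Char :=
  if r.head? = some c then r.tail else c :: r

theorem stepA_eq_stepB (t : List Char) (c : Char) :
    pvStepA t c = (stepB t.reverse c).reverse := by
  rcases List.eq_nil_or_concat t with rfl | ⟨l, x, rfl⟩
  · simp [pvStepA, stepB]
  · simp only [pvStepA, stepB, List.concat_eq_append]
    have hlen : ((l ++ [x]) ++ [c]).length = l.length + 2 := by simp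
    have h1 : PySem.List.pyGet? ((l ++ [x]) ++ [c]) (-1) = some c := by
      simp [PySem.List.pyGet?, PySem.List.pyIdx?]
    have h2 : PySem.List.pyGet? ((l ++ [x]) ++ [c]) (-2) = some x := by
      simp only [PySem.List.pyGet?, PySem.List.pyIdx?]
      norm_num
      simp only [show Int.toNat 2 = 2 from rfl, Nat.add_sub_cancel]
      rw [List.getElem_append_right (le_refl _)]
      simp
    have hrev : (l ++ [x]).reverse = x :: l.reverse := by simp
    rw [h1, h2, hlen, hrev]
    simp only [List.head?_cons, List.tail_cons]
    by_cases hxc : x = c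
    · subst hxc; simp
    · rw [if_neg (by omega), if_neg (fun h => hxc (Option.some.inj h).symm),
          if_neg (by simpa using hxc)]
      simp

theorem foldA_eq_foldB (s : List Char) : ∀ t : List Char,
    s.foldl pvStepA t = (List.foldl stepB t.reverse s).reverse := by
  induction s with
  | nil => intro t; simp
  | cons a s ih =>
      intro t
      simp only [List.foldl_cons]
      rw [ih, stepA_eq_stepB]
      simp

-- foldl over enumerate, ignoring the index, is foldl over the list
theorem foldl_enumerate (s : List Char) : ∀ (k : Int) (t : List Char),
    (PySem.List.enumerate s k).foldl (fun t p => pvStepA t p.2) t = s.foldl pvStepA t := by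
  induction s with
  | nil => intro k t; simp [PySem.List.enumerate_nil]
  | cons a s ih =>
      intro k t
      simp only [PySem.List.enumerate_cons, List.foldl_cons]
      exact ih _ _

-- a stack with no two adjacent equal characters
def Irr (t : List Char) : Prop := List.IsChain (· ≠ ·) t

theorem irr_stepB {t : List Char} (h : Irr t) (a : Char) : Irr (stepB t a) := by
  unfold stepB
  split
  · exact h.tail
  · rename_i hh
    refine List.isChain_cons.mpr ⟨?_, h⟩
    intro y hy he
    exact hh (by rw [hy]; exact congrArg some he.symm)

theorem stepB_stepB {t : List Char} (h : Irr t) (a : Char) :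
    stepB (stepB t a) a = t := by
  cases t with
  | nil => simp [stepB]
  | cons c t' =>
      by_cases hca : c = a
      · subst hca
        simp only [stepB, List.head?_cons, if_pos rfl, List.tail_cons]
        cases t' with
        | nil => simp [stepB]
        | cons d t'' =>
            have hcd : c ≠ d := by
              have := (List.isChain_cons.mp h).1
              exact this d (by simp)
            have hdc : ¬ d = c := fun hh => hcd hh.symm
            simp [stepB, hdc]
      · simp [stepB, hca]

theorem foldB_removePass (s : List Char) : ∀ t : List Char, Irr t →
    List.foldl stepB t (removePass s) = List.foldl stepB t s := by
  induction s using removePass.induct with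
  | case1 b r ih =>
      intro t ht
      rw [show removePass (b :: b :: r) = removePass r from by simp [removePass]]
      simp only [List.foldl_cons]
      rw [ih t ht, stepB_stepB ht]
  | case2 a b r hne ih =>
      intro t ht
      simp only [removePass, if_neg hne, List.foldl_cons]
      exact ih _ (irr_stepB ht a)
  | case3 l h =>
      intro t ht
      rw [removePass_short l h]

theorem foldB_fixPass (s : List Char) :
    List.foldl stepB [] (fixPass s) = List.foldl stepB [] s := by
  induction s using fixPass.induct with
  | case1 s h => rw [fixPass, dif_pos h]
  | case2 s h ih =>
      rw [fixPass, dif_neg h, ih, foldB_removePass s [] (by simp [Irr])]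

theorem removePass_fix_irr {l : List Char} (h : removePass l = l) : Irr l := by
  induction l using removePass.induct with
  | case1 b r ih =>
      exfalso
      have hle := removePass_length_le r
      rw [show removePass (b :: b :: r) = removePass r from by simp [removePass]] at h
      have : (removePass r).length = r.length + 2 := by rw [h]; simp
      omega
  | case2 a b r hne ih =>
      simp only [removePass, if_neg hne, List.cons.injEq, true_and] at h
      refine List.isChain_cons.mpr ⟨?_, ih h⟩
      intro y hy
      simp only [List.head?_cons, Option.mem_def, Option.some.injEq] at hy
      subst hy
      exact hne
  | case3 l hl =>
      rcases l with _ | ⟨a, _ | ⟨b, r⟩⟩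
      · simp [Irr]
      · simp [Irr]
      · exact (hl a b r rfl).elim

theorem foldB_irr (u : List Char) : ∀ t : List Char, Irr u →
    (∀ a, u.head? = some a → t.head? ≠ some a) →
    List.foldl stepB t u = u.reverse ++ t := by
  induction u with
  | nil => intro t _ _; simp
  | cons a u' ih =>
      intro t hu hh
      have hne : t.head? ≠ some a := hh a (by simp)
      simp only [List.foldl_cons, stepB, if_neg hne]
      rw [ih (a :: t) hu.tail ?_]
      · simp
      · intro b hb hcontra
        have hab : a = b := by simpa using hcontra
        have := (List.isChain_cons.mp hu).1 b (by simp [hb])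
        exact this hab

theorem removePass_fixPass (s : List Char) : removePass (fixPass s) = fixPass s := by
  induction s using fixPass.induct with
  | case1 s h => rw [fixPass, dif_pos h]; exact h
  | case2 s h ih => rw [fixPass, dif_neg h]; exact ih

theorem fixPass_empty_iff (s : List Char) :
    fixPass s = [] ↔ List.foldl stepB [] s = [] := by
  constructor
  · intro h
    have h2 := foldB_fixPass s
    rw [h] at h2
    simpa using h2.symm
  · intro h
    have h2 := foldB_fixPass s
    rw [h] at h2
    have hirr : Irr (fixPass s) := removePass_fix_irr (removePass_fixPass s)
    have h3 := foldB_irr (fixPass s) [] hirr (by simp)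
    rw [h2] at h3
    have h4 : (fixPass s).reverse = [] := by simpa using h3.symm
    simpa using congrArg List.reverse h4

-- ===== VERDICT (by name: the statement is the Claim_ definition above) =====
theorem solution_spec : Claim_equal_solution := by
  intro s _
  unfold Spec_solution solution solution_alt
  rw [foldl_enumerate s.toList 0 [], foldA_eq_foldB]
  simp only [List.reverse_nil, ne_eq, List.reverse_eq_nil_iff, ite_not]
  by_cases h : List.foldl stepB [] s.toList = []
  · rw [if_pos h, if_pos ((fixPass_empty_iff s.toList).mpr h)]
  · rw [if_neg h, if_neg (fun hc => h ((fixPass_empty_iff s.toList).mp hc))]
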